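-- pv_equiv track=rewrite | github.com/tdw419/geometry_os | systems/visual_shell/api/vm_terminal_detector.py | estimate_grid_size
-- ===== SOURCE A (Python) =====
-- from typing import List, Optional, Tuple, Dict, Any
--
-- def estimate_grid_size(text: str, char_width: int = 8, char_height: int = 16) -> Tuple[int, int]:
--     """
--     Estimate terminal grid size from text.
--
--     Args:
--         text: Terminal text content
--         char_width: Character width in pixels
--         char_height: Character height in pixels
--
--     Returns:
--         (cols, rows) tuple
--     """
--     lines = text.split('\n')
--     max_width = max((len(line) for line in lines), default=80)
--     rows = min(len(lines), 100)  # Cap at 100 rows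
--
--     cols = min(max_width, 200)  # Cap at 200 cols
--
--     # Ensure minimums
--     cols = max(cols, 40)
--     rows = max(rows, 10)
--
--     return (cols, rows)
-- ===== SOURCE B (Python) =====
-- def estimate_grid_size(text: str, char_width: int = 8, char_height: int = 16):
--     """Single-pass character scan: no intermediate list of lines is built."""
--     cur = 0
--     max_width = 0
--     line_count = 1
--     for ch in text:
--         if ch == '\n':
--             line_count += 1
--             max_width = max(max_width, cur)
--             cur = 0
--         else:
--             cur += 1
--     max_width = max(max_width, cur)
--     return (max(min(max_width, 200), 40), max(min(line_count, 100), 10))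
-- ===== Notes on version B (the rewrite author's own statement) =====
-- stated objective: alternative
-- what changed: Replaces the split-into-a-list-of-lines plus max-over-lines generator with a single character scan that maintains current-line length, running max width, and line count.
import Mathlib
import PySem

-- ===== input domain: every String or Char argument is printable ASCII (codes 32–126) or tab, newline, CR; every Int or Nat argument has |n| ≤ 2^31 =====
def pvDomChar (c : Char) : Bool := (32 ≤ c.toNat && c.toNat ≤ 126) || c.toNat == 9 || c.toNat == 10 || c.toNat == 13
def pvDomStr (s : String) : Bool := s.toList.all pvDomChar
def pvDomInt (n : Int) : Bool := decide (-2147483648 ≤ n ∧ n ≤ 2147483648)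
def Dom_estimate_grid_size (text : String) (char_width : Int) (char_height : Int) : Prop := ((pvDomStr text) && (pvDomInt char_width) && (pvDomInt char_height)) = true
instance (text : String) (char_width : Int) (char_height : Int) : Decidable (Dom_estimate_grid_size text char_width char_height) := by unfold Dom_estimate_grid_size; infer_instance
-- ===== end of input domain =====

-- B replaces A's split-into-lines-then-max with one character scan carrying (current line length, max width, line count); same cost, no intermediate list of lines.

-- ===== PORT A =====
def estimate_grid_size (text : String) (char_width : Int) (char_height : Int) : Int × Int :=
  let lines := PySem.Chars.splitOn text.toList ['\n']
  -- max((len(line) for line in lines), default=80): first element, then fold with max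
  let max_width : Nat := match lines.map List.length with
    | [] => 80
    | x :: xs => xs.foldl Nat.max x
  let rows : Int := min (lines.length : Int) 100
  let cols : Int := min (max_width : Int) 200
  let cols := max cols 40
  let rows := max rows 10
  (cols, rows)

-- ===== PORT B =====
def pvScanStep (st : Nat × Nat × Nat) (c : Char) : Nat × Nat × Nat :=
  if c = '\n' then (0, Nat.max st.2.1 st.1, st.2.2 + 1) else (st.1 + 1, st.2.1, st.2.2)

def estimate_grid_size_alt (text : String) (char_width : Int) (char_height : Int) : Int × Int :=
  let s := text.toList.foldl pvScanStep (0, 0, 1)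
  let max_width : Nat := Nat.max s.2.1 s.1
  (max (min (max_width : Int) 200) 40, max (min (s.2.2 : Int) 100) 10)

-- ===== PRECONDITION & SPEC =====
def Spec_estimate_grid_size (text : String) (char_width : Int) (char_height : Int) (out : Int × Int) : Prop := out = estimate_grid_size_alt text char_width char_height
instance (text : String) (char_width : Int) (char_height : Int) (out : Int × Int) : Decidable (Spec_estimate_grid_size text char_width char_height out) := by unfold Spec_estimate_grid_size; infer_instance

-- ===== CLAIM (what is proved, stated in full; the proofs are below) =====
def Claim_equal_estimate_grid_size : Prop := ∀ (text : String) (char_width : Int) (char_height : Int), Dom_estimate_grid_size text char_width char_height → Spec_estimate_grid_size text char_width char_height (estimate_grid_size text char_width char_height)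

-- ===== LEMMAS AND PROOFS =====

-- structural model of text.split('\n'): pre is the (already read) prefix of the current line
def pvSplit (pre : List Char) : List Char → List (List Char)
  | [] => [pre]
  | c :: rest => if c = '\n' then pre :: pvSplit [] rest else pvSplit (pre ++ [c]) rest

theorem pvSplit_ne_nil (pre l) : pvSplit pre l ≠ [] := by
  induction l generalizing pre with
  | nil => simp [pvSplit]
  | cons c rest ih =>
    simp only [pvSplit]
    split
    · simp
    · exact ih _

theorem pvSplit_length (pre : List Char) (l : List Char) :
    (pvSplit pre l).length = l.count '\n' + 1 := by
  induction l generalizing pre with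
  | nil => simp [pvSplit]
  | cons c rest ih =>
    by_cases h : c = '\n'
    · subst h; simp [pvSplit, ih]
    · simp [pvSplit, h, ih]

theorem splitOn_go_eq (fuel : Nat) (l cur : List Char) (acc : List (List Char))
    (h : l.length < fuel) :
    PySem.Chars.splitOn.go ['\n'] fuel l cur acc = acc.reverse ++ pvSplit cur.reverse l := by
  induction fuel generalizing l cur acc with
  | zero => omega
  | succ f ih =>
    cases l with
    | nil => simp [PySem.Chars.splitOn.go, pvSplit]
    | cons c rest =>
      by_cases hc : c = '\n'
      · subst hc
        rw [PySem.Chars.splitOn.go]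
        simp only [List.isPrefixOf]
        rw [if_pos (by simp)]
        simp only [List.length, List.drop_succ_cons, List.drop_zero] at *
        rw [ih rest [] (cur.reverse :: acc) (by simpa using Nat.lt_of_succ_lt_succ h)]
        simp [pvSplit]
      · rw [PySem.Chars.splitOn.go]
        rw [if_neg (by simp [List.isPrefixOf_iff_prefix, List.prefix_cons_iff, Ne.symm hc])]
        rw [ih rest (c :: cur) acc (by simpa using Nat.lt_of_succ_lt_succ h)]
        simp [pvSplit, hc]

theorem splitOn_eq_pvSplit (l : List Char) :
    PySem.Chars.splitOn l ['\n'] = pvSplit [] l := by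
  rw [PySem.Chars.splitOn, splitOn_go_eq _ _ _ _ (by omega)]
  simp

theorem foldl_nat_max (L : List Nat) (a : Nat) :
    L.foldl Nat.max a = Nat.max a (L.foldl Nat.max 0) := by
  induction L generalizing a with
  | nil => simp
  | cons x xs ih =>
    simp only [List.foldl_cons]
    rw [ih (Nat.max a x), ih (Nat.max 0 x)]
    simp [Nat.max_assoc]

theorem scan_final (l : List Char) (pre : List Char) (maxw cnt : Nat) :
    (fun st : Nat × Nat × Nat => (Nat.max st.2.1 st.1, st.2.2))
        (l.foldl pvScanStep (pre.length, maxw, cnt))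
      = (Nat.max maxw (((pvSplit pre l).map List.length).foldl Nat.max 0),
         cnt + l.count '\n') := by
  induction l generalizing pre maxw cnt with
  | nil => simp [pvSplit]
  | cons c rest ih =>
    by_cases hc : c = '\n'
    · subst hc
      simp only [List.foldl_cons, pvScanStep, reduceIte]
      have := ih ([] : List Char) (Nat.max maxw pre.length) (cnt + 1)
      simp only [List.length_nil] at this
      rw [this]
      simp only [pvSplit, List.count_cons, beq_self_eq_true, if_true,
        List.map_cons, List.foldl_cons]
      rw [foldl_nat_max _ (Nat.max 0 pre.length), Prod.mk.injEq]
      exact ⟨by simp [Nat.max_assoc], by omega⟩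
    · simp only [List.foldl_cons, pvScanStep, if_neg hc]
      have := ih (pre ++ [c]) maxw cnt
      simp only [List.length_append, List.length_cons, List.length_nil] at this
      rw [show pre.length + 1 = pre.length + (0+1) from by omega] at this ⊢
      rw [this]
      simp [pvSplit, hc]

theorem pv_nat_eqs (l : List Char) :
    (let s := l.foldl pvScanStep (0, 0, 1);
     (Nat.max s.2.1 s.1, s.2.2))
      = (((pvSplit [] l).map List.length).foldl Nat.max 0, l.count '\n' + 1) := by
  have := scan_final l [] 0 1
  simp only [List.length_nil] at this
  simp only []
  rw [show (l.foldl pvScanStep (0,0,1)).2.2 = ((fun st : Nat × Nat × Nat => (Nat.max st.2.1 st.1, st.2.2)) (l.foldl pvScanStep (0,0,1))).2 from rfl,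
      show Nat.max (l.foldl pvScanStep (0,0,1)).2.1 (l.foldl pvScanStep (0,0,1)).1 = ((fun st : Nat × Nat × Nat => (Nat.max st.2.1 st.1, st.2.2)) (l.foldl pvScanStep (0,0,1))).1 from rfl,
      this]
  simp [Nat.add_comm]

-- ===== VERDICT (by name: the statement is the Claim_ definition above) =====
theorem estimate_grid_size_spec : Claim_equal_estimate_grid_size := by
  intro text cw ch _
  simp only [Spec_estimate_grid_size, estimate_grid_size, estimate_grid_size_alt]
  have hnat := pv_nat_eqs text.toList
  simp only [] at hnat
  have h1 := congrArg Prod.fst hnat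
  have h2 := congrArg Prod.snd hnat
  simp only [] at h1 h2
  rw [splitOn_eq_pvSplit, pvSplit_length]
  -- max_width: the nonempty-list fold equals foldl Nat.max 0
  have hmw : (match (pvSplit [] text.toList).map List.length with
      | [] => (80 : Nat)
      | x :: xs => xs.foldl Nat.max x)
      = ((pvSplit [] text.toList).map List.length).foldl Nat.max 0 := by
    cases hL : (pvSplit [] text.toList).map List.length with
    | nil =>
      exact absurd (List.map_eq_nil_iff.mp hL) (pvSplit_ne_nil [] text.toList)
    | cons x xs =>
      show xs.foldl Nat.max x = (x :: xs).foldl Nat.max 0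
      rw [List.foldl_cons, foldl_nat_max xs x, foldl_nat_max xs (Nat.max 0 x)]
      simp
  rw [hmw, ← h1, ← h2]
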